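-- pv_equiv track=rewrite | github.com/AnVales/code_signal_arcade | 3 - Smooth Sailing/commonCharacterCount2.py | solution
-- ===== SOURCE A (Python) =====
-- def solution(s1, s2):
--
--     # Initialise variables
--     used_letters = []
--     common_letters = 0
--
--     # Save the letters that are common
--     for letter in s1:
--         if letter in s2 and letter not in used_letters:
--             used_letters.append(letter)
--             if s1.count(letter) == s2.count(letter):
--                 common_letters = common_letters + s1.count(letter)
--             elif s1.count(letter) < s2.count(letter):
--                 common_letters = common_letters + s1.count(letter)
--             elif s1.count(letter) > s2.count(letter):
--                 common_letters = common_letters + s2.count(letter)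
--
--     return common_letters
-- ===== SOURCE B (Python) =====
-- def solution(s1, s2):
--     a = sorted(s1)
--     b = sorted(s2)
--     i = j = common = 0
--     while i < len(a) and j < len(b):
--         if a[i] == b[j]:
--             common += 1
--             i += 1
--             j += 1
--         elif a[i] < b[j]:
--             i += 1
--         else:
--             j += 1
--     return common
-- ===== Notes on version B (the rewrite author's own statement) =====
-- stated objective: alternative
-- what changed: Replaces A's per-letter membership tests and repeated .count scans with sorting both strings once and a single two-pointer merge that tallies matched occurrences.
import Mathlib
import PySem

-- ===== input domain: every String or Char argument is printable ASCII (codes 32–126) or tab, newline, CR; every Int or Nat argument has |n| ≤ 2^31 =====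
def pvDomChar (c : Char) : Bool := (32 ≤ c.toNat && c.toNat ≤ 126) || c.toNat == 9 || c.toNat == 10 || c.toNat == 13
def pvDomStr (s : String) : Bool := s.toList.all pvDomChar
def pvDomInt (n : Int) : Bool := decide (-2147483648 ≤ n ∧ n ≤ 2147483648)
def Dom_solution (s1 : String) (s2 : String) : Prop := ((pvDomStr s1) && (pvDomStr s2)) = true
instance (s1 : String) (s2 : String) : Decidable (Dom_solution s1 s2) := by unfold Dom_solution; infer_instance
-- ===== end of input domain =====

-- B replaces A's per-letter membership tests and repeated .count scans by sorting both
-- strings once and tallying matches in a single two-pointer merge (an alternative algorithm).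


-- ===== PORT A =====
-- One loop step of A: `letter` iterates over s1; iterating a Python str yields 1-char
-- strings, so `letter in s2` is ported as the substring test with the singleton needle
-- and `s.count(letter)` as PySem.Chars.count with the singleton needle (both exact).
def solStepA (l1 l2 : List Char) (st : List Char × Int) (letter : Char) : List Char × Int :=
  if PySem.Chars.isIn [letter] l2 && !(st.1.contains letter) then
    let used := st.1 ++ [letter]
    let c1 : Int := (PySem.Chars.count l1 [letter] : Int)
    let c2 : Int := (PySem.Chars.count l2 [letter] : Int)
    if c1 = c2 then (used, st.2 + c1)
    else if c1 < c2 then (used, st.2 + c1)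
    else if c1 > c2 then (used, st.2 + c2)
    else (used, st.2)
  else st

def solution (s1 : String) (s2 : String) : Int :=
  (s1.toList.foldl (solStepA s1.toList s2.toList) ([], 0)).2

-- ===== PORT B =====
-- The while-loop of B: two pointers over the two sorted lists, realised as structural
-- recursion on the unseen suffixes with the running counter as accumulator.
def mergeGo : List Char → List Char → Int → Int
  | [], _, common => common
  | _, [], common => common
  | x :: xs, y :: ys, common =>
    if x = y then mergeGo xs ys (common + 1)
    else if x < y then mergeGo xs (y :: ys) common
    else mergeGo (x :: xs) ys common
  termination_by a b _ => a.length + b.length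

def solution_alt (s1 : String) (s2 : String) : Int :=
  mergeGo (PySem.List.sorted s1.toList (fun c => c) false)
          (PySem.List.sorted s2.toList (fun c => c) false) 0

-- ===== PRECONDITION & SPEC =====
def Spec_solution (s1 : String) (s2 : String) (out : Int) : Prop := out = solution_alt s1 s2
instance (s1 : String) (s2 : String) (out : Int) : Decidable (Spec_solution s1 s2 out) := by unfold Spec_solution; infer_instance

-- ===== CLAIM (what is proved, stated in full; the proofs are below) =====
def Claim_equal_solution : Prop := ∀ (s1 : String) (s2 : String), Dom_solution s1 s2 → Spec_solution s1 s2 (solution s1 s2)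

-- ===== LEMMAS AND PROOFS =====

-- `s.count(c)` with a single-character needle is the character count.
theorem charsCount_go_singleton (c : Char) :
    ∀ (l : List Char) (fuel acc : Nat), l.length ≤ fuel →
      PySem.Chars.count.go [c] fuel l acc = acc + l.count c := by
  intro l
  induction l with
  | nil => intro fuel acc _; cases fuel <;> simp [PySem.Chars.count.go]
  | cons h t ih =>
    intro fuel acc hf
    cases fuel with
    | zero => simp at hf
    | succ f =>
      by_cases hch : c = h
      · subst hch
        simp only [PySem.Chars.count.go, List.isPrefixOf]
        simp only [beq_self_eq_true, Bool.true_and, if_true, List.length_singleton,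
          List.drop_one, List.tail_cons]
        rw [ih f (acc + 1) (by simpa using hf)]
        simp
        omega
      · simp only [PySem.Chars.count.go, List.isPrefixOf]
        rw [if_neg (by simp [hch])]
        rw [ih f acc (by simpa using hf)]
        simp [List.count_cons]
        intro h'; exact absurd h'.symm hch

theorem charsCount_singleton (l : List Char) (c : Char) :
    PySem.Chars.count l [c] = l.count c := by
  simp only [PySem.Chars.count, List.isEmpty_cons, if_false, Bool.false_eq_true]
  simpa using charsCount_go_singleton c l l.length 0 le_rfl

-- `c in s` with a single character is membership.
theorem charsIsIn_singleton (l : List Char) (c : Char) :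
    PySem.Chars.isIn [c] l = true ↔ c ∈ l := by
  rw [PySem.Chars.isIn_iff_infix]
  constructor
  · intro h; exact h.mem (List.mem_singleton_self c)
  · intro h
    obtain ⟨u, v, rfl⟩ := List.append_of_mem h
    exact ⟨u, v, by simp⟩

-- The common value both programs compute: |multiset intersection|.
def interCard (a b : List Char) : Nat := Multiset.card ((↑a : Multiset Char) ∩ ↑b)

-- A's loop invariant: the accumulator grows by Σ min-counts over the not-yet-used
-- common letters of the remaining input.
theorem foldA_eq (l1 l2 : List Char) :
    ∀ (rest u : List Char) (acc : Int),
      (rest.foldl (solStepA l1 l2) (u, acc)).2 =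
        acc + ∑ c ∈ (rest.toFinset ∩ l2.toFinset) \ u.toFinset,
          ((min (l1.count c) (l2.count c) : Nat) : Int) := by
  intro rest
  induction rest with
  | nil => intro u acc; simp
  | cons x rest' ih =>
    intro u acc
    rw [List.foldl_cons]
    by_cases hcond : (PySem.Chars.isIn [x] l2 && !(u.contains x)) = true
    · have hcond' : PySem.Chars.isIn [x] l2 = true ∧ x ∉ u := by simpa using hcond
      have hx2 : x ∈ l2 := (charsIsIn_singleton l2 x).1 hcond'.1
      have hxu : x ∉ u := hcond'.2
      have hstep : solStepA l1 l2 (u, acc) x =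
          (u ++ [x], acc + ((min (l1.count x) (l2.count x) : Nat) : Int)) := by
        simp only [solStepA, hcond, if_true]
        rw [charsCount_singleton, charsCount_singleton]
        split_ifs with h1 h2 h3 <;> simp only [Prod.mk.injEq, true_and] <;> push_cast <;> omega
      rw [hstep, ih]
      have hxS : x ∈ ((x :: rest').toFinset ∩ l2.toFinset) \ u.toFinset := by
        refine Finset.mem_sdiff.mpr ⟨Finset.mem_inter.mpr ⟨?_, ?_⟩, ?_⟩ <;> simp [hx2, hxu]
      rw [← Finset.add_sum_erase _ _ hxS]
      have hsets : (((x :: rest').toFinset ∩ l2.toFinset) \ u.toFinset).erase x =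
          (rest'.toFinset ∩ l2.toFinset) \ (u ++ [x]).toFinset := by
        ext c
        simp only [Finset.mem_erase, Finset.mem_sdiff, Finset.mem_inter,
          List.mem_toFinset, List.mem_cons, List.mem_append]
        tauto
      rw [hsets]
      ring
    · have hstep : solStepA l1 l2 (u, acc) x = (u, acc) := by
        simp only [solStepA]
        rw [if_neg hcond]
      rw [hstep, ih]
      have hx : x ∉ l2 ∨ x ∈ u := by
        by_cases h2 : x ∈ l2
        · by_cases hu : x ∈ u
          · exact Or.inr hu
          · exact absurd (by simp [(charsIsIn_singleton l2 x).2 h2, hu]) hcond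
        · exact Or.inl h2
      have hsets : ((x :: rest').toFinset ∩ l2.toFinset) \ u.toFinset =
          (rest'.toFinset ∩ l2.toFinset) \ u.toFinset := by
        ext c
        simp only [Finset.mem_sdiff, Finset.mem_inter, List.mem_toFinset, List.mem_cons]
        constructor
        · rintro ⟨⟨hc1 | hc1, hc2⟩, hc3⟩
          · subst hc1; tauto
          · exact ⟨⟨hc1, hc2⟩, hc3⟩
        · rintro ⟨⟨hc1, hc2⟩, hc3⟩; exact ⟨⟨Or.inr hc1, hc2⟩, hc3⟩
      rw [hsets]

-- Σ over the common support of min-counts IS the multiset-intersection cardinality.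
theorem sum_min_eq_interCard (a b : List Char) :
    ∑ c ∈ a.toFinset ∩ b.toFinset, ((min (a.count c) (b.count c) : Nat) : Int) =
      (interCard a b : Int) := by
  unfold interCard
  rw [← Multiset.toFinset_sum_count_eq ((↑a : Multiset Char) ∩ ↑b)]
  have hset : ((↑a : Multiset Char) ∩ ↑b).toFinset = a.toFinset ∩ b.toFinset := by
    ext c
    simp
  push_cast
  rw [hset]
  apply Finset.sum_congr rfl
  intro c _
  simp

-- B's merge on sorted lists computes the multiset-intersection cardinality.
theorem mergeGo_eq :
    ∀ (a b : List Char) (n : Int), a.Pairwise (· ≤ ·) → b.Pairwise (· ≤ ·) →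
      mergeGo a b n = n + (interCard a b : Int) := by
  intro a b n
  induction a, b, n using mergeGo.induct with
  | case1 b n => intro _ _; simp [mergeGo, interCard]
  | case2 a n _ =>
    intro _ _
    match a with
    | [] => simp [mergeGo, interCard]
    | x :: xs => simp [mergeGo, interCard]
  | case3 xs y ys n ih =>
    intro ha hb
    rw [show mergeGo (y :: xs) (y :: ys) n = mergeGo xs ys (n + 1) by
      simp [mergeGo]]
    rw [ih ha.tail hb.tail]
    have hcns : ((y ::ₘ (↑xs : Multiset Char)) ∩ (y ::ₘ ↑ys)) =
        y ::ₘ ((↑xs : Multiset Char) ∩ ↑ys) := by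
      ext c
      simp only [Multiset.count_inter, Multiset.count_cons]
      split_ifs <;> omega
    simp only [interCard, ← Multiset.cons_coe, hcns, Multiset.card_cons]
    push_cast
    ring
  | case4 x xs y ys n hne hlt ih =>
    intro ha hb
    rw [show mergeGo (x :: xs) (y :: ys) n = mergeGo xs (y :: ys) n by
      simp [mergeGo, hne, hlt]]
    rw [ih ha.tail hb]
    have h0 : Multiset.count x (y ::ₘ (↑ys : Multiset Char)) = 0 := by
      rw [Multiset.count_cons_of_ne hne, Multiset.coe_count, List.count_eq_zero]
      intro hmem
      exact absurd (lt_of_lt_of_le hlt (List.rel_of_pairwise_cons hb hmem)) (lt_irrefl x)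
    have hdrop : ((x ::ₘ (↑xs : Multiset Char)) ∩ (y ::ₘ ↑ys)) =
        (↑xs : Multiset Char) ∩ (y ::ₘ ↑ys) := by
      ext c
      simp only [Multiset.count_inter]
      by_cases hc : c = x
      · subst hc; rw [h0]; simp
      · rw [Multiset.count_cons_of_ne hc]
    simp only [interCard, ← Multiset.cons_coe, hdrop]
  | case5 x xs y ys n hne hnlt ih =>
    intro ha hb
    rw [show mergeGo (x :: xs) (y :: ys) n = mergeGo (x :: xs) ys n by
      simp [mergeGo, hne, hnlt]]
    rw [ih ha hb.tail]
    have hylt : y < x := by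
      rcases lt_trichotomy x y with h | h | h
      · exact absurd h hnlt
      · exact absurd h hne
      · exact h
    have h0 : Multiset.count y (x ::ₘ (↑xs : Multiset Char)) = 0 := by
      rw [Multiset.count_cons_of_ne (ne_of_lt hylt), Multiset.coe_count, List.count_eq_zero]
      intro hmem
      exact absurd (lt_of_lt_of_le hylt (List.rel_of_pairwise_cons ha hmem)) (lt_irrefl y)
    have hdrop : ((x ::ₘ (↑xs : Multiset Char)) ∩ (y ::ₘ ↑ys)) =
        (x ::ₘ (↑xs : Multiset Char)) ∩ ↑ys := by
      ext c
      simp only [Multiset.count_inter]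
      by_cases hc : c = y
      · subst hc; rw [h0]; simp
      · rw [Multiset.count_cons_of_ne hc]
    simp only [interCard, ← Multiset.cons_coe, hdrop]

-- ===== VERDICT (by name: the statement is the Claim_ definition above) =====
theorem solution_spec : Claim_equal_solution := by
  intro s1 s2 _
  unfold Spec_solution solution solution_alt
  rw [foldA_eq]
  rw [mergeGo_eq _ _ _ (by simpa using PySem.List.sorted_pairwise s1.toList (fun c => c))
    (by simpa using PySem.List.sorted_pairwise s2.toList (fun c => c))]
  have hperm1 : (↑(PySem.List.sorted s1.toList (fun c => c) false) : Multiset Char) = ↑s1.toList :=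
    Multiset.coe_eq_coe.mpr (PySem.List.sorted_perm s1.toList (fun c => c) false)
  have hperm2 : (↑(PySem.List.sorted s2.toList (fun c => c) false) : Multiset Char) = ↑s2.toList :=
    Multiset.coe_eq_coe.mpr (PySem.List.sorted_perm s2.toList (fun c => c) false)
  rw [show interCard (PySem.List.sorted s1.toList (fun c => c) false)
        (PySem.List.sorted s2.toList (fun c => c) false) = interCard s1.toList s2.toList by
      unfold interCard; rw [hperm1, hperm2]]
  rw [← sum_min_eq_interCard]
  simp
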